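-- pv_equiv track=rewrite | github.com/cristiano-nicolau/FP | fp/1.py | unload
-- ===== SOURCE A (Python) =====
-- def unload(t, m, q):
-- 	for elem in t[::-1]:
-- 		if m in elem:
-- 			if elem[1] > q:
-- 				elem[1] -= q
-- 				q = 0
-- 			else:
-- 				q -= elem[1]
-- 				t.remove(elem)
-- 	return 0 if q == 0 else q
-- ===== SOURCE B (Python) =====
-- def unload(t, m, q):
--     kept = []
--     for elem in t[::-1]:
--         if m in elem:
--             if elem[1] > q:
--                 elem[1] -= q
--                 q = 0
--                 kept.append(elem)
--             else:
--                 q -= elem[1]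
--         else:
--             kept.append(elem)
--     t[:] = kept[::-1]
--     return q
-- ===== Notes on version B (the rewrite author's own statement) =====
-- stated objective: alternative
-- what changed: Replaces the repeated list.remove inner scans with a single reverse pass that accumulates the kept elements and reassigns t[:] once, computing the residual quantity in the same pass.
-- outside the precondition, e.g. on unload([[5]], 5, 3): A raises IndexError, B raises IndexError
import Mathlib
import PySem

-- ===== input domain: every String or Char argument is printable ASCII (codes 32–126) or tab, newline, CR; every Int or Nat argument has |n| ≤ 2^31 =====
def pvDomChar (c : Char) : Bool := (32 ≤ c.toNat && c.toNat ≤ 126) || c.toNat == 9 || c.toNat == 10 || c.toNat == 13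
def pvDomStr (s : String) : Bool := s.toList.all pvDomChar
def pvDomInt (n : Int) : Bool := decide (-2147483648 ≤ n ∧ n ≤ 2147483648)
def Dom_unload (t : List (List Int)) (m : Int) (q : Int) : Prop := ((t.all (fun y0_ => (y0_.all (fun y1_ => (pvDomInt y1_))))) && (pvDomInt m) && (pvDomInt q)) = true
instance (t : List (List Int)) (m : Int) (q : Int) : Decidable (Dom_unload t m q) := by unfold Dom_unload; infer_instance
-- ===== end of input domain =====

-- B replaces A's repeated list.remove scans with one reverse pass that accumulates
-- the kept rows and reassigns t[:] once (alternative algorithm); equivalence proved is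
-- about the RETURN value only (A and B both mutate t; on lists with duplicate rows
-- A's remove may delete a different equal occurrence than B keeps).

-- ===== PORT A =====
-- Iterates over the snapshot t[::-1] carrying q; the mutations of t (remove) and of
-- elem (elem[1] -= q) never influence the returned value, since iteration is over the
-- snapshot and each snapshot element is visited once (value semantics: no aliasing).
-- elem[1] is PySem.List.pyGet?; the none (IndexError) case is excluded by Pre_unload,
-- getD 0 there is never the claimed value.
def unload (t : List (List Int)) (m : Int) (q : Int) : Int :=
  let rev := (PySem.List.slice? t none none (-1)).getD []   -- t[::-1]
  let q' := rev.foldl (fun q elem =>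
    if elem.contains m then
      if (PySem.List.pyGet? elem 1).getD 0 > q then 0
      else q - (PySem.List.pyGet? elem 1).getD 0
    else q) q
  if q' = 0 then 0 else q'

-- ===== PORT B =====
-- One pass over reversed t with state (kept, q); returns q (kept models t[:] = kept[::-1]).
def unload_alt (t : List (List Int)) (m : Int) (q : Int) : Int :=
  let step : List (List Int) × Int → List Int → List (List Int) × Int :=
    fun (s : List (List Int) × Int) (elem : List Int) =>
      if elem.contains m then
        let v := (PySem.List.pyGet? elem 1).getD 0
        if v > s.2 then (s.1 ++ [elem.set 1 (v - s.2)], 0)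
        else (s.1, s.2 - v)
      else (s.1 ++ [elem], s.2)
  (t.reverse.foldl step ([], q)).2

-- ===== PRECONDITION & SPEC =====
-- Pre_ excludes exactly the inputs where Python A raises IndexError: a row containing m
-- but shorter than 2, on which elem[1] raises.
def Pre_unload (t : List (List Int)) (m : Int) (q : Int) : Prop :=
  ∀ e ∈ t, e.contains m → 2 ≤ e.length
instance (t : List (List Int)) (m : Int) (q : Int) : Decidable (Pre_unload t m q) := by
  unfold Pre_unload; infer_instance
def pvWitness_unload : List (List Int) × Int × Int := ([[1, 2], [1, 3], [2, 5]], 1, 4)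

def Spec_unload (t : List (List Int)) (m : Int) (q : Int) (out : Int) : Prop := out = unload_alt t m q
instance (t : List (List Int)) (m : Int) (q : Int) (out : Int) : Decidable (Spec_unload t m q out) := by unfold Spec_unload; infer_instance

-- ===== CLAIM (what is proved, stated in full; the proofs are below) =====
def Claim_equal_unload : Prop := ∀ (t : List (List Int)) (m : Int) (q : Int), Dom_unload t m q → Pre_unload t m q → Spec_unload t m q (unload t m q)

-- ===== LEMMAS AND PROOFS =====

-- The q-component of B's pair fold equals A's scalar fold, for any kept accumulator.
theorem unload_fold_eq (m : Int) (l : List (List Int)) :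
    ∀ (kept : List (List Int)) (q : Int),
      (l.foldl (fun (s : List (List Int) × Int) (elem : List Int) =>
          if elem.contains m then
            let v := (PySem.List.pyGet? elem 1).getD 0
            if v > s.2 then (s.1 ++ [elem.set 1 (v - s.2)], 0)
            else (s.1, s.2 - v)
          else (s.1 ++ [elem], s.2)) (kept, q)).2
      = l.foldl (fun q elem =>
          if elem.contains m then
            if (PySem.List.pyGet? elem 1).getD 0 > q then 0
            else q - (PySem.List.pyGet? elem 1).getD 0
          else q) q := by
  induction l with
  | nil => intro kept q; rfl
  | cons e rest ih =>
      intro kept q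
      simp only [List.foldl_cons]
      by_cases hc : e.contains m
      · simp only [hc, if_true]
        by_cases hv : (PySem.List.pyGet? e 1).getD 0 > q
        · simp only [hv, if_true, ih]
        · simp only [hv, if_false, ih]
      · simp only [hc, Bool.false_eq_true, if_false, ih]

-- ===== VERDICT (by name: the statement is the Claim_ definition above) =====
theorem unload_spec : Claim_equal_unload := by
  intro t m q _ _
  unfold Spec_unload unload unload_alt
  rw [PySem.List.slice?_none_none_neg_one]
  simp only [Option.getD_some]
  rw [unload_fold_eq]
  split_ifs with h
  · omega
  · rfl
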